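-- pv_equiv track=rewrite | github.com/tietiy/tietiy-scanner | scanner/bridge/composers/eod.py | _count_outcomes
-- ===== SOURCE A (Python) =====
-- def _count_outcomes(sdrs: list) -> dict:
--     """Count resolutions by outcome type."""
--     counts = _empty_outcome_counts()
--     for sdr in sdrs:
--         if not isinstance(sdr, dict):
--             continue
--         outcome = (sdr.get("outcome") or {}).get("outcome")
--         if outcome and outcome in counts:
--             counts[outcome] += 1
--     return counts
--
-- def _empty_outcome_counts() -> dict:
--     return {
--         "TARGET_HIT": 0,
--         "STOP_HIT":   0,
--         "DAY6_WIN":   0,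
--         "DAY6_LOSS":  0,
--         "DAY6_FLAT":  0,
--     }
-- ===== SOURCE B (Python) =====
-- def _count_outcomes(sdrs: list) -> dict:
--     """Count resolutions by outcome type: one independent scan per template key."""
--     def matches(sdr, key):
--         return isinstance(sdr, dict) and (sdr.get("outcome") or {}).get("outcome") == key
--     return {key: sum(1 for sdr in sdrs if matches(sdr, key))
--             for key in ("TARGET_HIT", "STOP_HIT", "DAY6_WIN", "DAY6_LOSS", "DAY6_FLAT")}
-- ===== Notes on version B (the rewrite author's own statement) =====
-- stated objective: alternative
-- what changed: A makes one pass maintaining a pre-built five-key dict it increments in place under a membership guard; B keeps no counting state at all and instead makes one independent equality-count scan of the list per template key, assembling the result by comprehension.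
import Mathlib
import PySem

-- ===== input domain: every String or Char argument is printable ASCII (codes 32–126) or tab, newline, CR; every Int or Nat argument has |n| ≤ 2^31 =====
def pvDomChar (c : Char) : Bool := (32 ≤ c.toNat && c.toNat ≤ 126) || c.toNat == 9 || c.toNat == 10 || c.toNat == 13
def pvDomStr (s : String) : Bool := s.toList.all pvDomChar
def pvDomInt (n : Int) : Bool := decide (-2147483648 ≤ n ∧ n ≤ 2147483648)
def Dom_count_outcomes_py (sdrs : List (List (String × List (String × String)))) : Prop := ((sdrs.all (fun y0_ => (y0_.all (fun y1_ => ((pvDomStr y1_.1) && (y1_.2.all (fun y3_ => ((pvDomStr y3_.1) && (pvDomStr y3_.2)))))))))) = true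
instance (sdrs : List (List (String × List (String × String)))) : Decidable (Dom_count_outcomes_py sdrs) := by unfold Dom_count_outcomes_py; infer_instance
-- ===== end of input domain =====

-- B replaces A's single stateful pass over a pre-built five-key dict by five independent
-- per-key equality-count scans assembled by comprehension; same result, no counting dict.

-- shared transliteration of the expression `(sdr.get("outcome") or {}).get("outcome")`
-- (it appears verbatim in both Pythons)
def pvOutcome (sdr : List (String × List (String × String))) : Option String :=
  let inner : List (String × String) :=
    match (PySem.Dict.mk sdr).get? "outcome" with
    | some l => if l = [] then [] else l   -- `or {}`: an empty dict is falsy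
    | none => []
  (PySem.Dict.mk inner).get? "outcome"

-- ===== PORT A =====
-- A's loop body: increment only when the outcome is truthy and already a key of counts
def pvStepA (counts : PySem.Dict String Int) (sdr : List (String × List (String × String))) : PySem.Dict String Int :=
  match pvOutcome sdr with
  | some o => if o != "" && counts.contains o then counts.modify o 0 (· + 1) else counts
  | none => counts

def count_outcomes_py (sdrs : List (List (String × List (String × String)))) : List (String × Int) :=
  (sdrs.foldl pvStepA (PySem.Dict.mk
    [("TARGET_HIT", 0), ("STOP_HIT", 0), ("DAY6_WIN", 0), ("DAY6_LOSS", 0), ("DAY6_FLAT", 0)])).items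

-- ===== PORT B =====
-- B's per-key predicate: `matches(sdr, key)` (isinstance is always true under the type convention)
def pvMatches (sdr : List (String × List (String × String))) (key : String) : Bool :=
  pvOutcome sdr == some key

-- `sum(1 for sdr in sdrs if matches(sdr, key))`
def pvKeyCount (sdrs : List (List (String × List (String × String)))) (key : String) : Int :=
  sdrs.foldl (fun acc sdr => if pvMatches sdr key then acc + 1 else acc) 0

def count_outcomes_py_alt (sdrs : List (List (String × List (String × String)))) : List (String × Int) :=
  ["TARGET_HIT", "STOP_HIT", "DAY6_WIN", "DAY6_LOSS", "DAY6_FLAT"].map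
    (fun key => (key, pvKeyCount sdrs key))

-- ===== PRECONDITION & SPEC =====
def Spec_count_outcomes_py (sdrs : List (List (String × List (String × String)))) (out : List (String × Int)) : Prop := out = count_outcomes_py_alt sdrs
instance (sdrs : List (List (String × List (String × String)))) (out : List (String × Int)) : Decidable (Spec_count_outcomes_py sdrs out) := by unfold Spec_count_outcomes_py; infer_instance

-- ===== CLAIM (what is proved, stated in full; the proofs are below) =====
def Claim_equal_count_outcomes_py : Prop := ∀ (sdrs : List (List (String × List (String × String)))), Dom_count_outcomes_py sdrs → Spec_count_outcomes_py sdrs (count_outcomes_py sdrs)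

-- ===== LEMMAS AND PROOFS =====

-- number of entries whose extracted outcome equals k
def pvN (sdrs : List (List (String × List (String × String)))) (k : String) : Int :=
  ((sdrs.filterMap pvOutcome).count k : Int)

lemma hit_1 (s : List (String × List (String × String))) (a b c d e : Int)
    (h : pvOutcome s = some "TARGET_HIT") :
    pvStepA (PySem.Dict.mk [("TARGET_HIT", a), ("STOP_HIT", b), ("DAY6_WIN", c), ("DAY6_LOSS", d), ("DAY6_FLAT", e)]) s
    = PySem.Dict.mk [("TARGET_HIT", a + 1), ("STOP_HIT", b), ("DAY6_WIN", c), ("DAY6_LOSS", d), ("DAY6_FLAT", e)] := by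
  simp [pvStepA, h, PySem.Dict.modify, PySem.Dict.get?, PySem.Dict.insert, PySem.Dict.getD]

lemma hit_2 (s : List (String × List (String × String))) (a b c d e : Int)
    (h : pvOutcome s = some "STOP_HIT") :
    pvStepA (PySem.Dict.mk [("TARGET_HIT", a), ("STOP_HIT", b), ("DAY6_WIN", c), ("DAY6_LOSS", d), ("DAY6_FLAT", e)]) s
    = PySem.Dict.mk [("TARGET_HIT", a), ("STOP_HIT", b + 1), ("DAY6_WIN", c), ("DAY6_LOSS", d), ("DAY6_FLAT", e)] := by
  simp [pvStepA, h, PySem.Dict.modify, PySem.Dict.get?, PySem.Dict.insert, PySem.Dict.getD]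

lemma hit_3 (s : List (String × List (String × String))) (a b c d e : Int)
    (h : pvOutcome s = some "DAY6_WIN") :
    pvStepA (PySem.Dict.mk [("TARGET_HIT", a), ("STOP_HIT", b), ("DAY6_WIN", c), ("DAY6_LOSS", d), ("DAY6_FLAT", e)]) s
    = PySem.Dict.mk [("TARGET_HIT", a), ("STOP_HIT", b), ("DAY6_WIN", c + 1), ("DAY6_LOSS", d), ("DAY6_FLAT", e)] := by
  simp [pvStepA, h, PySem.Dict.modify, PySem.Dict.get?, PySem.Dict.insert, PySem.Dict.getD]

lemma hit_4 (s : List (String × List (String × String))) (a b c d e : Int)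
    (h : pvOutcome s = some "DAY6_LOSS") :
    pvStepA (PySem.Dict.mk [("TARGET_HIT", a), ("STOP_HIT", b), ("DAY6_WIN", c), ("DAY6_LOSS", d), ("DAY6_FLAT", e)]) s
    = PySem.Dict.mk [("TARGET_HIT", a), ("STOP_HIT", b), ("DAY6_WIN", c), ("DAY6_LOSS", d + 1), ("DAY6_FLAT", e)] := by
  simp [pvStepA, h, PySem.Dict.modify, PySem.Dict.get?, PySem.Dict.insert, PySem.Dict.getD]

lemma hit_5 (s : List (String × List (String × String))) (a b c d e : Int)
    (h : pvOutcome s = some "DAY6_FLAT") :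
    pvStepA (PySem.Dict.mk [("TARGET_HIT", a), ("STOP_HIT", b), ("DAY6_WIN", c), ("DAY6_LOSS", d), ("DAY6_FLAT", e)]) s
    = PySem.Dict.mk [("TARGET_HIT", a), ("STOP_HIT", b), ("DAY6_WIN", c), ("DAY6_LOSS", d), ("DAY6_FLAT", e + 1)] := by
  simp [pvStepA, h, PySem.Dict.modify, PySem.Dict.get?, PySem.Dict.insert, PySem.Dict.getD]

lemma foldA (sdrs : List (List (String × List (String × String)))) (a b c d e : Int) :
    sdrs.foldl pvStepA (PySem.Dict.mk
      [("TARGET_HIT", a), ("STOP_HIT", b), ("DAY6_WIN", c), ("DAY6_LOSS", d), ("DAY6_FLAT", e)])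
    = PySem.Dict.mk
      [("TARGET_HIT", a + pvN sdrs "TARGET_HIT"), ("STOP_HIT", b + pvN sdrs "STOP_HIT"),
       ("DAY6_WIN", c + pvN sdrs "DAY6_WIN"), ("DAY6_LOSS", d + pvN sdrs "DAY6_LOSS"),
       ("DAY6_FLAT", e + pvN sdrs "DAY6_FLAT")] := by
  induction sdrs generalizing a b c d e with
  | nil => simp [pvN]
  | cons s ss ih =>
    rw [List.foldl_cons]
    cases h : pvOutcome s with
    | none =>
      simp only [pvStepA, h]
      rw [ih]
      simp [pvN, h]
    | some o =>
      by_cases h1 : o = "TARGET_HIT"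
      · subst h1
        rw [hit_1 s a b c d e h]
        rw [ih]
        simp [pvN, h]
        omega
      by_cases h2 : o = "STOP_HIT"
      · subst h2
        rw [hit_2 s a b c d e h]
        rw [ih]
        simp [pvN, h]
        omega
      by_cases h3 : o = "DAY6_WIN"
      · subst h3
        rw [hit_3 s a b c d e h]
        rw [ih]
        simp [pvN, h]
        omega
      by_cases h4 : o = "DAY6_LOSS"
      · subst h4
        rw [hit_4 s a b c d e h]
        rw [ih]
        simp [pvN, h]
        omega
      by_cases h5 : o = "DAY6_FLAT"
      · subst h5
        rw [hit_5 s a b c d e h]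
        rw [ih]
        simp [pvN, h]
        omega
      · -- o is not one of the five template keys: A skips it
        have hc : (PySem.Dict.mk [("TARGET_HIT", a), ("STOP_HIT", b), ("DAY6_WIN", c),
            ("DAY6_LOSS", d), ("DAY6_FLAT", e)]).contains o = false := by
          simp
          exact ⟨(h1 ·.symm), (h2 ·.symm), (h3 ·.symm), (h4 ·.symm), (h5 ·.symm)⟩
        simp only [pvStepA, h, hc, Bool.and_false, if_neg Bool.false_ne_true]
        rw [ih]
        simp [pvN, h]
        exact ⟨(List.count_cons_of_ne h1).symm, (List.count_cons_of_ne h2).symm,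
          (List.count_cons_of_ne h3).symm, (List.count_cons_of_ne h4).symm,
          (List.count_cons_of_ne h5).symm⟩

lemma keyCount_shift (sdrs : List (List (String × List (String × String)))) (k : String) (c : Int) :
    sdrs.foldl (fun acc sdr => if pvMatches sdr k then acc + 1 else acc) c = c + pvN sdrs k := by
  induction sdrs generalizing c with
  | nil => simp [pvN]
  | cons s ss ih =>
    rw [List.foldl_cons, ih]
    cases h : pvOutcome s with
    | none => simp [pvMatches, h, pvN]
    | some o =>
      by_cases hk : o = k
      · subst hk
        simp [pvMatches, h, pvN]
        omega
      · simp [pvMatches, h, hk, pvN]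

lemma keyCount_eq (sdrs : List (List (String × List (String × String)))) (k : String) :
    pvKeyCount sdrs k = pvN sdrs k := by
  simpa using keyCount_shift sdrs k 0

-- ===== VERDICT (by name: the statement is the Claim_ definition above) =====
theorem count_outcomes_py_spec : Claim_equal_count_outcomes_py := by
  intro sdrs _
  unfold Spec_count_outcomes_py count_outcomes_py count_outcomes_py_alt
  rw [foldA]
  simp [keyCount_eq]
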